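-- pv_equiv track=rewrite | github.com/zerorock1312/lt-maker-master | app/utilities/utils.py | raytrace
-- ===== SOURCE A (Python) =====
-- def raytrace(pos1: tuple, pos2: tuple) -> list:
--     """
--     Draws line between pos1 and pos2 for a taxicab grid
--     """
--     x0, y0 = pos1
--     x1, y1 = pos2
--     tiles = []
--     dx = abs(x1 - x0)
--     dy = abs(y1 - y0)
--     x, y = x0, y0
--     n = 1 + dx + dy
--     x_inc = 1 if x1 > x0 else -1
--     y_inc = 1 if y1 > y0 else -1
--     error = dx - dy
--     dx *= 2
--     dy *= 2
--
--     while n > 0: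
--         tiles.append((x, y))
--         if error > 0:
--             x += x_inc
--             error -= dy
--         else:
--             y += y_inc
--             error += dx
--         n -= 1
--     return tiles
-- ===== SOURCE B (Python) =====
-- def raytrace(pos1: tuple, pos2: tuple) -> list:
--     """
--     Draws line between pos1 and pos2 for a taxicab grid.
--     Event-merge formulation: the x-steps cross the line at parameters
--     (2i+1)/(2*dx) and the y-steps at (2j+1)/(2*dy); merging the two sorted
--     event lists (compared cross-multiplied, ties letting the y-event go
--     first) gives the move sequence, and a prefix scan yields the tiles.
--     """
--     x0, y0 = pos1
--     x1, y1 = pos2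
--     dx = abs(x1 - x0)
--     dy = abs(y1 - y0)
--     x_inc = 1 if x1 > x0 else -1
--     y_inc = 1 if y1 > y0 else -1
--     # stage 1: sorted event keys (common denominator 2*dx*dy dropped)
--     xkeys = [(2 * i + 1) * dy for i in range(dx)]
--     ykeys = [(2 * j + 1) * dx for j in range(dy)]
--     # stage 2: merge into a move list (ties -> y-event first)
--     moves = []
--     i = j = 0
--     while i < dx and j < dy:
--         if xkeys[i] < ykeys[j]:
--             moves.append((x_inc, 0))
--             i += 1
--         else:
--             moves.append((0, y_inc))
--             j += 1
--     while i < dx: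
--         moves.append((x_inc, 0))
--         i += 1
--     while j < dy:
--         moves.append((0, y_inc))
--         j += 1
--     # stage 3: prefix-scan the moves into tiles
--     tiles = [(x0, y0)]
--     x, y = x0, y0
--     for mx, my in moves:
--         x += mx
--         y += my
--         tiles.append((x, y))
--     return tiles
-- ===== Notes on version B (the rewrite author's own statement) =====
-- stated objective: alternative
-- what changed: Replaces the one-pass error-accumulator walk by a staged event-merge algorithm: build the two sorted lists of axis-crossing event keys ((2i+1)*dy for x-steps, (2j+1)*dx for y-steps), merge them into a move list (ties let the y-event go first), then prefix-scan the moves into tiles.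
import Mathlib
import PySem

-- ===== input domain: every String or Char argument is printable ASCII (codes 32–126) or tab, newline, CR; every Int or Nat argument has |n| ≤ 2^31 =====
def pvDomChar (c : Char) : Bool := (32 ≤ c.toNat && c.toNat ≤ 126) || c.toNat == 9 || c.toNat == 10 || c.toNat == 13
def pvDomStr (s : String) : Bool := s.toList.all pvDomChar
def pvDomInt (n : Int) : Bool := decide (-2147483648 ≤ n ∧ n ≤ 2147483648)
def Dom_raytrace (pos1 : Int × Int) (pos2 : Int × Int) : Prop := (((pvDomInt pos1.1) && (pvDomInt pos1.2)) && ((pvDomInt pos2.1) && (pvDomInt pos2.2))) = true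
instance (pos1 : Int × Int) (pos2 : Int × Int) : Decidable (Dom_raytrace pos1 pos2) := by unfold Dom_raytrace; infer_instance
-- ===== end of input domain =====

-- B replaces A's incremental error-accumulator walk by a staged event-merge: sorted crossing-event keys, a merge into a move list, and a prefix scan; same value, same cost.

-- ===== PORT A =====
-- A's while loop: fuel = n, state (x, y, error)
def rayLoopA (dx2 dy2 xinc yinc : Int) : Nat → Int → Int → Int → List (Int × Int)
  | 0, _, _, _ => []
  | n + 1, x, y, error =>
    (x, y) ::
      (if error > 0 then rayLoopA dx2 dy2 xinc yinc n (x + xinc) y (error - dy2)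
       else rayLoopA dx2 dy2 xinc yinc n x (y + yinc) (error + dx2))

def raytrace (pos1 : Int × Int) (pos2 : Int × Int) : List (Int × Int) :=
  let x0 := pos1.1; let y0 := pos1.2
  let x1 := pos2.1; let y1 := pos2.2
  let dx := |x1 - x0|
  let dy := |y1 - y0|
  let n := 1 + dx + dy
  let x_inc : Int := if x1 > x0 then 1 else -1
  let y_inc : Int := if y1 > y0 then 1 else -1
  rayLoopA (2 * dx) (2 * dy) x_inc y_inc n.toNat x0 y0 (dx - dy)

-- ===== PORT B =====
-- B's merge of the two sorted event-key lists into a move list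
-- (the three Python while loops, as the standard structural merge recursion)
def mergeMoves (xinc yinc : Int) : List Int → List Int → List (Int × Int)
  | [], [] => []
  | [], _ :: bs => (0, yinc) :: mergeMoves xinc yinc [] bs
  | _ :: as, [] => (xinc, 0) :: mergeMoves xinc yinc as []
  | a :: as, b :: bs =>
    if a < b then (xinc, 0) :: mergeMoves xinc yinc as (b :: bs)
    else (0, yinc) :: mergeMoves xinc yinc (a :: as) bs

-- B's prefix scan: tiles = [(x0,y0)] then one tile per move
def scanMoves : Int → Int → List (Int × Int) → List (Int × Int)
  | x, y, [] => [(x, y)]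
  | x, y, (mx, my) :: ms => (x, y) :: scanMoves (x + mx) (y + my) ms

def raytrace_alt (pos1 : Int × Int) (pos2 : Int × Int) : List (Int × Int) :=
  let x0 := pos1.1; let y0 := pos1.2
  let x1 := pos2.1; let y1 := pos2.2
  let dx := |x1 - x0|
  let dy := |y1 - y0|
  let x_inc : Int := if x1 > x0 then 1 else -1
  let y_inc : Int := if y1 > y0 then 1 else -1
  let xkeys := (PySem.List.pyRange 0 dx 1).map (fun i => (2 * i + 1) * dy)
  let ykeys := (PySem.List.pyRange 0 dy 1).map (fun j => (2 * j + 1) * dx)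
  scanMoves x0 y0 (mergeMoves x_inc y_inc xkeys ykeys)

-- ===== PRECONDITION & SPEC =====
def Spec_raytrace (pos1 : Int × Int) (pos2 : Int × Int) (out : List (Int × Int)) : Prop := out = raytrace_alt pos1 pos2
instance (pos1 : Int × Int) (pos2 : Int × Int) (out : List (Int × Int)) : Decidable (Spec_raytrace pos1 pos2 out) := by unfold Spec_raytrace; infer_instance

-- ===== CLAIM (what is proved, stated in full; the proofs are below) =====
def Claim_equal_raytrace : Prop := ∀ (pos1 : Int × Int) (pos2 : Int × Int), Dom_raytrace pos1 pos2 → Spec_raytrace pos1 pos2 (raytrace pos1 pos2)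

-- ===== LEMMAS AND PROOFS =====

-- proof-side intermediate: A's loop with the decision re-expressed by step counters ix, iy
def rayLoopC (dx dy xinc yinc : Int) : Nat → Int → Int → Int → Int → List (Int × Int)
  | 0, _, _, _, _ => []
  | n + 1, x, y, ix, iy =>
    (x, y) ::
      (if (2 * ix + 1) * dy < (2 * iy + 1) * dx then
        rayLoopC dx dy xinc yinc n (x + xinc) y (ix + 1) iy
       else rayLoopC dx dy xinc yinc n x (y + yinc) ix (iy + 1))

-- one-step unfold lemmas (rw unfolds exactly once)
lemma rayLoopC_succ (dx dy xi yi : Int) (n : Nat) (x y ix iy : Int) :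
    rayLoopC dx dy xi yi (n + 1) x y ix iy =
      (x, y) :: (if (2 * ix + 1) * dy < (2 * iy + 1) * dx then
        rayLoopC dx dy xi yi n (x + xi) y (ix + 1) iy
       else rayLoopC dx dy xi yi n x (y + yi) ix (iy + 1)) := rfl

lemma merge_cons_cons (xi yi a b : Int) (as bs : List Int) :
    mergeMoves xi yi (a :: as) (b :: bs) =
      if a < b then (xi, 0) :: mergeMoves xi yi as (b :: bs)
      else (0, yi) :: mergeMoves xi yi (a :: as) bs := by simp [mergeMoves]

lemma merge_cons_nil (xi yi a : Int) (as : List Int) :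
    mergeMoves xi yi (a :: as) [] = (xi, 0) :: mergeMoves xi yi as [] := by simp [mergeMoves]

lemma merge_nil_cons (xi yi b : Int) (bs : List Int) :
    mergeMoves xi yi [] (b :: bs) = (0, yi) :: mergeMoves xi yi [] bs := by simp [mergeMoves]

lemma scan_cons (x y mx my : Int) (ms : List (Int × Int)) :
    scanMoves x y ((mx, my) :: ms) = (x, y) :: scanMoves (x + mx) (y + my) ms := rfl

-- Invariant: A's error equals dx*(1+2*iy) - dy*(1+2*ix), so A's loop is the counter loop.
lemma loopA_eq_loopC (dx dy xi yi : Int) : ∀ (n : Nat) (x y ix iy : Int),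
    rayLoopA (2 * dx) (2 * dy) xi yi n x y (dx * (1 + 2 * iy) - dy * (1 + 2 * ix)) =
      rayLoopC dx dy xi yi n x y ix iy := by
  intro n
  induction n with
  | zero => intro x y ix iy; rfl
  | succ n ih =>
    intro x y ix iy
    simp only [rayLoopA, rayLoopC]
    have hc : (dx * (1 + 2 * iy) - dy * (1 + 2 * ix) > 0) ↔
        ((2 * ix + 1) * dy < (2 * iy + 1) * dx) := by
      have e1 : (2 * ix + 1) * dy = dy * (1 + 2 * ix) := by ring
      have e2 : (2 * iy + 1) * dx = dx * (1 + 2 * iy) := by ring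
      rw [e1, e2]; omega
    by_cases h : (2 * ix + 1) * dy < (2 * iy + 1) * dx
    · rw [if_pos (hc.mpr h), if_pos h]
      have he : dx * (1 + 2 * iy) - dy * (1 + 2 * ix) - 2 * dy =
          dx * (1 + 2 * iy) - dy * (1 + 2 * (ix + 1)) := by ring
      rw [he, ih]
    · rw [if_neg (fun hh => h (hc.mp hh)), if_neg h]
      have he : dx * (1 + 2 * iy) - dy * (1 + 2 * ix) + 2 * dx =
          dx * (1 + 2 * (iy + 1)) - dy * (1 + 2 * ix) := by ring
      rw [he, ih]

-- The merge-and-scan of the remaining event keys is the counter loop.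
lemma scan_merge_eq_loopC (dx dy xi yi : Int) : ∀ (n : Nat) (x y ix iy : Int),
    0 ≤ ix → 0 ≤ iy → ix ≤ dx → iy ≤ dy → n = ((dx - ix) + (dy - iy)).toNat →
    scanMoves x y (mergeMoves xi yi
        ((PySem.List.pyRange ix dx 1).map (fun i => (2 * i + 1) * dy))
        ((PySem.List.pyRange iy dy 1).map (fun j => (2 * j + 1) * dx))) =
      rayLoopC dx dy xi yi (n + 1) x y ix iy := by
  intro n
  induction n with
  | zero =>
    intro x y ix iy hx0 hy0 hxd hyd hn
    rw [PySem.List.pyRange_one_eq_nil (show dx ≤ ix by omega),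
        PySem.List.pyRange_one_eq_nil (show dy ≤ iy by omega)]
    simp [mergeMoves, scanMoves, rayLoopC]
  | succ n ih =>
    intro x y ix iy hx0 hy0 hxd hyd hn
    rw [rayLoopC_succ]
    by_cases hx : ix < dx
    · by_cases hy : iy < dy
      · -- both event lists nonempty
        rw [PySem.List.pyRange_one_cons hx, PySem.List.pyRange_one_cons hy,
            List.map_cons, List.map_cons, merge_cons_cons]
        by_cases h : (2 * ix + 1) * dy < (2 * iy + 1) * dx
        · rw [if_pos h, if_pos h, scan_cons, add_zero]
          have hk : ((2 * iy + 1) * dx :: (PySem.List.pyRange (iy + 1) dy 1).map (fun j => (2 * j + 1) * dx))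
              = (PySem.List.pyRange iy dy 1).map (fun j => (2 * j + 1) * dx) := by
            rw [PySem.List.pyRange_one_cons hy, List.map_cons]
          rw [hk]
          exact congrArg (List.cons (x, y))
            (ih (x + xi) y (ix + 1) iy (by omega) hy0 (by omega) hyd (by omega))
        · rw [if_neg h, if_neg h, scan_cons, add_zero]
          have hk : ((2 * ix + 1) * dy :: (PySem.List.pyRange (ix + 1) dx 1).map (fun i => (2 * i + 1) * dy))
              = (PySem.List.pyRange ix dx 1).map (fun i => (2 * i + 1) * dy) := by
            rw [PySem.List.pyRange_one_cons hx, List.map_cons]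
          rw [hk]
          exact congrArg (List.cons (x, y))
            (ih x (y + yi) ix (iy + 1) hx0 (by omega) hxd (by omega) (by omega))
      · -- y events exhausted (iy = dy): only x-steps remain, and A's test is true
        have hiy : iy = dy := by omega
        rw [PySem.List.pyRange_one_cons hx, PySem.List.pyRange_one_eq_nil (show dy ≤ iy by omega),
            List.map_cons, List.map_nil, merge_cons_nil]
        have hcond : (2 * ix + 1) * dy < (2 * iy + 1) * dx := by
          nlinarith [mul_le_mul_of_nonneg_right (show (2 * ix + 1 : Int) ≤ 2 * dx - 1 by omega) hy0]
        rw [if_pos hcond, scan_cons, add_zero]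
        have h2 := ih (x + xi) y (ix + 1) iy (by omega) hy0 (by omega) hyd (by omega)
        rw [PySem.List.pyRange_one_eq_nil (show dy ≤ iy by omega), List.map_nil] at h2
        exact congrArg (List.cons (x, y)) h2
    · -- x events exhausted (ix = dx): only y-steps remain, and A's test is false
      have hix : ix = dx := by omega
      have hy : iy < dy := by omega
      rw [PySem.List.pyRange_one_eq_nil (show dx ≤ ix by omega), PySem.List.pyRange_one_cons hy,
          List.map_nil, List.map_cons, merge_nil_cons]
      have hcond : ¬ (2 * ix + 1) * dy < (2 * iy + 1) * dx := by
        nlinarith [mul_le_mul_of_nonneg_right (show (2 * iy + 1 : Int) ≤ 2 * dy - 1 by omega) hx0]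
      rw [if_neg hcond, scan_cons, add_zero]
      have h2 := ih x (y + yi) ix (iy + 1) hx0 (by omega) hxd (by omega) (by omega)
      rw [PySem.List.pyRange_one_eq_nil (show dx ≤ ix by omega), List.map_nil] at h2
      exact congrArg (List.cons (x, y)) h2

-- ===== VERDICT (by name: the statement is the Claim_ definition above) =====
theorem raytrace_spec : Claim_equal_raytrace := by
  intro pos1 pos2 _
  simp only [Spec_raytrace, raytrace, raytrace_alt]
  have hdx0 : 0 ≤ |pos2.1 - pos1.1| := abs_nonneg _
  have hdy0 : 0 ≤ |pos2.2 - pos1.2| := abs_nonneg _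
  have hB := scan_merge_eq_loopC |pos2.1 - pos1.1| |pos2.2 - pos1.2|
    (if pos2.1 > pos1.1 then 1 else -1) (if pos2.2 > pos1.2 then 1 else -1)
    ((|pos2.1 - pos1.1| - 0) + (|pos2.2 - pos1.2| - 0)).toNat pos1.1 pos1.2 0 0
    le_rfl le_rfl hdx0 hdy0 rfl
  have hA := loopA_eq_loopC |pos2.1 - pos1.1| |pos2.2 - pos1.2|
    (if pos2.1 > pos1.1 then 1 else -1) (if pos2.2 > pos1.2 then 1 else -1)
    (((|pos2.1 - pos1.1| - 0) + (|pos2.2 - pos1.2| - 0)).toNat + 1) pos1.1 pos1.2 0 0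
  have hfuel : (1 + |pos2.1 - pos1.1| + |pos2.2 - pos1.2|).toNat =
      ((|pos2.1 - pos1.1| - 0) + (|pos2.2 - pos1.2| - 0)).toNat + 1 := by omega
  have herr : |pos2.1 - pos1.1| * (1 + 2 * 0) - |pos2.2 - pos1.2| * (1 + 2 * 0) =
      |pos2.1 - pos1.1| - |pos2.2 - pos1.2| := by ring
  rw [herr] at hA
  rw [hfuel, hA, ← hB]
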